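-- pv_equiv track=rewrite | github.com/totokunda/apex-studio | apps/api/src/memory_management/budget_offloading.py | _matches_ignore
-- ===== SOURCE A (Python) =====
-- from typing import Any, Dict, Iterable, List, Optional, Tuple, Union
--
-- def _matches_ignore(name: str, ignore_modules: Optional[Iterable[str]]) -> bool:
--     if not ignore_modules:
--         return False
--     for ignore in ignore_modules:
--         if not ignore:
--             continue
--         if name == ignore or name.startswith(f"{ignore}."):
--             return True
--     return False
-- ===== SOURCE B (Python) =====
-- def _matches_ignore(name, ignore_modules):
--     if not ignore_modules:
--         return False
--     ignore_set = {m for m in ignore_modules if m}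
--     for i, ch in enumerate(name):
--         if ch == '.' and name[:i] in ignore_set:
--             return True
--     return name in ignore_set
-- ===== Notes on version B (the rewrite author's own statement) =====
-- stated objective: alternative
-- what changed: Instead of scanning every ignore entry with startswith, B builds a set of the non-empty entries once and walks name left-to-right, testing each dotted-prefix of name (and finally name itself) for set membership.
import Mathlib
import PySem

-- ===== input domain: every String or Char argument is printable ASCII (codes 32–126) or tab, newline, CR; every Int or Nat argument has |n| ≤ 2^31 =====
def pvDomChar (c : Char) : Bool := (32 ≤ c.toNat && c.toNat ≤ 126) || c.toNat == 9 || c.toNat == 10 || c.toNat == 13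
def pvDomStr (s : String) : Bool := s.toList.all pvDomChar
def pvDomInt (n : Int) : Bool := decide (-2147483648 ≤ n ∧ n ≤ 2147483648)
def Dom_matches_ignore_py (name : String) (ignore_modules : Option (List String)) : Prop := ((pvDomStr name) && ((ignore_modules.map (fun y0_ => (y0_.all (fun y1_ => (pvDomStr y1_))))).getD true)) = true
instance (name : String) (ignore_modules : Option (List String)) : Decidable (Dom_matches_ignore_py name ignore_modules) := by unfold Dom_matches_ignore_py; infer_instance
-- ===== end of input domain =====

-- B builds a set of the non-empty ignore entries once and tests each dotted prefix of
-- name (and name itself) for membership, instead of scanning every entry with startswith.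

-- ===== PORT A =====
-- the 'for ignore in ignore_modules' loop: skip falsy entries, return True on a match
def pvALoop (name : String) : List String → Bool
  | [] => false
  | ig :: rest =>
    if ig = "" then pvALoop name rest
    else if name = ig || PySem.Chars.startswith name.toList (ig.toList ++ ['.']) then true
    else pvALoop name rest

def matches_ignore_py (name : String) (ignore_modules : Option (List String)) : Bool :=
  match ignore_modules with
  | none => false          -- 'if not ignore_modules: return False' (None case)
  | some l => if l = [] then false else pvALoop name l

-- ===== PORT B =====
-- 'for i, ch in enumerate(name): if ch == "." and name[:i] in ignore_set: return True'
-- seen = name[:i] (the characters already passed), rest = the characters not yet visited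
def pvBLoop (igset : PySem.Set String) (seen rest : List Char) : Bool :=
  match rest with
  | [] => false
  | c :: rs =>
    if c = '.' && PySem.Set.contains igset (String.ofList seen) then true
    else pvBLoop igset (seen ++ [c]) rs

def matches_ignore_py_alt (name : String) (ignore_modules : Option (List String)) : Bool :=
  match ignore_modules with
  | none => false
  | some l =>
    if l = [] then false
    else
      let igset : PySem.Set String := PySem.Set.ofList (l.filter (fun m => m ≠ ""))
      if pvBLoop igset [] name.toList then true
      else PySem.Set.contains igset name   -- 'return name in ignore_set'

-- ===== PRECONDITION & SPEC =====
def Spec_matches_ignore_py (name : String) (ignore_modules : Option (List String)) (out : Bool) : Prop := out = matches_ignore_py_alt name ignore_modules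
instance (name : String) (ignore_modules : Option (List String)) (out : Bool) : Decidable (Spec_matches_ignore_py name ignore_modules out) := by unfold Spec_matches_ignore_py; infer_instance

-- ===== CLAIM (what is proved, stated in full; the proofs are below) =====
def Claim_equal_matches_ignore_py : Prop := ∀ (name : String) (ignore_modules : Option (List String)), Dom_matches_ignore_py name ignore_modules → Spec_matches_ignore_py name ignore_modules (matches_ignore_py name ignore_modules)

-- ===== LEMMAS AND PROOFS =====

-- A's loop returns true iff some non-empty entry equals name or is a dotted ancestor of it
theorem pvALoop_iff (name : String) (l : List String) :
    pvALoop name l = true ↔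
      ∃ ig ∈ l, ig ≠ "" ∧ (name = ig ∨
        PySem.Chars.startswith name.toList (ig.toList ++ ['.']) = true) := by
  induction l with
  | nil => simp [pvALoop]
  | cons ig rest ih =>
    by_cases hig : ig = ""
    · simp [pvALoop, hig, ih]
    · by_cases hm : (name = ig ∨ PySem.Chars.startswith name.toList (ig.toList ++ ['.']) = true)
      · simp only [pvALoop, if_neg hig]
        rcases hm with hm | hm <;> simp_all
      · rw [not_or] at hm
        simp only [pvALoop, if_neg hig]
        rw [if_neg (by simpa using hm)]
        simp only [ih, List.mem_cons]
        constructor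
        · rintro ⟨x, hx, h⟩; exact ⟨x, Or.inr hx, h⟩
        · rintro ⟨x, hx | hx, h⟩
          · subst hx; rcases h.2 with h2 | h2
            · exact absurd h2 hm.1
            · exact absurd h2 hm.2
          · exact ⟨x, hx, h⟩

-- 'ts ++ "." is a prefix of cs' ↔ 'cs has a dot at position |ts| with ts before it'
theorem pvStartswith_dot_iff (cs ts : List Char) :
    PySem.Chars.startswith cs (ts ++ ['.']) = true ↔
      ∃ i, ∃ h : i < cs.length, cs[i] = '.' ∧ cs.take i = ts := by
  rw [PySem.Chars.startswith_iff]
  constructor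
  · rintro ⟨t, ht⟩
    refine ⟨ts.length, ?_, ?_, ?_⟩ <;> subst ht <;> simp
  · rintro ⟨i, h, hdot, htake⟩
    refine ⟨cs.drop (i + 1), ?_⟩
    have hd : cs.drop i = cs[i] :: cs.drop (i + 1) := List.drop_eq_getElem_cons h
    calc (ts ++ ['.']) ++ cs.drop (i + 1)
        = cs.take i ++ (cs[i] :: cs.drop (i + 1)) := by rw [htake, hdot]; simp
      _ = cs.take i ++ cs.drop i := by rw [hd]
      _ = cs := List.take_append_drop i cs

-- B's loop returns true iff some dot position of 'rest' has seen ++ (chars before it) in the set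
theorem pvBLoop_iff (igset : PySem.Set String) (seen rest : List Char) :
    pvBLoop igset seen rest = true ↔
      ∃ i, ∃ h : i < rest.length, rest[i] = '.' ∧
        PySem.Set.contains igset (String.ofList (seen ++ rest.take i)) = true := by
  induction rest generalizing seen with
  | nil => simp [pvBLoop]
  | cons c rs ih =>
    simp only [pvBLoop]
    by_cases hc : c = '.' ∧ PySem.Set.contains igset (String.ofList seen) = true
    · rw [if_pos (by rw [hc.1, hc.2]; simp)]
      simp only [true_iff]
      exact ⟨0, by simp, by simpa using hc.1, by simpa using hc.2⟩
    · rw [if_neg (by rcases Decidable.em (c = '.') with h | h <;> simp_all)]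
      rw [ih]
      constructor
      · rintro ⟨i, h, hdot, hmem⟩
        exact ⟨i + 1, by simpa using h, by simpa using hdot, by simpa using hmem⟩
      · rintro ⟨i, h, hdot, hmem⟩
        cases i with
        | zero =>
          exfalso; exact hc ⟨by simpa using hdot, by simpa using hmem⟩
        | succ j =>
          exact ⟨j, by simpa using h, by simpa using hdot, by simpa using hmem⟩

-- membership in B's set = a non-empty entry of l equal to s
theorem pvSet_mem_iff (l : List String) (s : String) :
    PySem.Set.contains (PySem.Set.ofList (l.filter (fun m => m ≠ ""))) s = true ↔
      s ∈ l ∧ s ≠ "" := by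
  rw [PySem.Set.contains_iff, PySem.Set.mem_ofList, List.mem_filter]
  simp

theorem pvNonempty_eq (name : String) (l : List String) (hl : l ≠ []) :
    matches_ignore_py name (some l) = matches_ignore_py_alt name (some l) := by
  simp only [matches_ignore_py, matches_ignore_py_alt, if_neg hl]
  set igset := PySem.Set.ofList (l.filter (fun m => m ≠ "")) with higset
  have hb : (if pvBLoop igset [] name.toList then true else PySem.Set.contains igset name) = true ↔
      pvBLoop igset [] name.toList = true ∨ PySem.Set.contains igset name = true := by
    split_ifs with h <;> simp [h]
  rw [Bool.eq_iff_iff, pvALoop_iff, hb, pvBLoop_iff]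
  constructor
  · rintro ⟨ig, hig, hne, hm | hsw⟩
    · right
      rw [higset, pvSet_mem_iff]
      exact ⟨hm ▸ hig, hm ▸ hne⟩
    · left
      rw [pvStartswith_dot_iff] at hsw
      obtain ⟨i, h, hdot, htake⟩ := hsw
      refine ⟨i, h, hdot, ?_⟩
      rw [higset, pvSet_mem_iff]
      have : String.ofList ([] ++ name.toList.take i) = ig := by
        simp [htake, String.ofList_toList]
      rw [this]
      exact ⟨hig, hne⟩
  · rintro (⟨i, h, hdot, hmem⟩ | hmem)
    · rw [higset, pvSet_mem_iff] at hmem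
      refine ⟨String.ofList (name.toList.take i), by simpa using hmem.1, hmem.2, Or.inr ?_⟩
      rw [pvStartswith_dot_iff]
      exact ⟨i, h, hdot, by simp⟩
    · rw [higset, pvSet_mem_iff] at hmem
      exact ⟨name, hmem.1, hmem.2, Or.inl rfl⟩

-- ===== VERDICT (by name: the statement is the Claim_ definition above) =====
theorem matches_ignore_py_spec : Claim_equal_matches_ignore_py := by
  intro name im _
  unfold Spec_matches_ignore_py
  match im with
  | none => rfl
  | some l =>
    by_cases hl : l = []
    · subst hl; rfl
    · exact pvNonempty_eq name l hl
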